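-- pv_equiv track=rewrite | github.com/thomas0809/RxnScribe | rxnscribe/tokenizer.py | split_heuristic_helper
-- ===== SOURCE A (Python) =====
-- def split_heuristic_helper(toprocess):
--     maxy = 0
--     for pair in toprocess:
--         if pair[0][1]>maxy:
--             maxy = pair[0][1]
--     numbuckets = int(maxy//500 + 1)
--
--     buckets = {}
--     for i in range(numbuckets):
--         buckets[i] = []
--
--     for pair in toprocess:
--         buckets[int(pair[0][1]//500)].append(pair)
--
--     for bucket in buckets:
--         buckets[bucket] = sorted(buckets[bucket], key = lambda x: x[0][0])
--     toreturn = []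
--
--     for bucket in buckets:
--         toreturn+=buckets[bucket]
--
--     return toreturn
-- ===== SOURCE B (Python) =====
-- def split_heuristic_helper(toprocess):
--     return sorted(toprocess, key=lambda p: (p[0][1] // 500, p[0][0]))
-- ===== Notes on version B (the rewrite author's own statement) =====
-- stated objective: simpler
-- what changed: Replaces the maxy scan, bucket dict, per-bucket sorts and concatenation with a single stable sort keyed by (y//500, x), relying on sort stability for the within-bucket order.
-- outside the precondition, e.g. on split_heuristic_helper([((1, -1), 0)]): A raises KeyError, B returns [((1, -1), 0)]
import Mathlib
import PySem

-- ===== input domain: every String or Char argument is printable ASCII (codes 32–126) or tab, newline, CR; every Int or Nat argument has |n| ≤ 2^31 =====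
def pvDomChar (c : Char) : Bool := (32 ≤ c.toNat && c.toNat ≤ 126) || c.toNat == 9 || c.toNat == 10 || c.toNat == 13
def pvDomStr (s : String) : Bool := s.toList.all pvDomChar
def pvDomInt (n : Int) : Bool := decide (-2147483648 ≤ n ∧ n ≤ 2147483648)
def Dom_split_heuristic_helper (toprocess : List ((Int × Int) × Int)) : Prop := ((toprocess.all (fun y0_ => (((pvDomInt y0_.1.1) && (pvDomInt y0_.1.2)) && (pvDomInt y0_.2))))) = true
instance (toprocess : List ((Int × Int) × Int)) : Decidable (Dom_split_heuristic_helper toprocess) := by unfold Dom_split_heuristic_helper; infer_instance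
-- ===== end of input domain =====

-- B replaces A's maxy scan + bucket dict + per-bucket sorts + concatenation by ONE stable sort
-- keyed by (y//500, x); objective: simpler.


-- ===== PORT A =====
def split_heuristic_helper (toprocess : List ((Int × Int) × Int)) : List ((Int × Int) × Int) :=
  let maxy : Int := toprocess.foldl (fun maxy pair => if pair.1.2 > maxy then pair.1.2 else maxy) 0
  let numbuckets : Int := PySem.Int.floordiv maxy 500 + 1
  let buckets0 : PySem.Dict Int (List ((Int × Int) × Int)) :=
    (PySem.List.pyRange 0 numbuckets).foldl (fun d i => d.insert i []) PySem.Dict.empty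
  -- buckets[pair[0][1]//500].append(pair): Python raises KeyError when the key is absent
  -- (exactly when some y < 0); Pre_ excludes that, so `modify` agrees with Python on all admitted inputs.
  let buckets1 := toprocess.foldl
    (fun d pair => d.modify (PySem.Int.floordiv pair.1.2 500) [] (· ++ [pair])) buckets0
  let buckets2 := buckets1.keys.foldl
    (fun d bucket => d.insert bucket (PySem.List.sorted (d.getD bucket []) (fun x => x.1.1))) buckets1
  buckets2.keys.foldl (fun toreturn bucket => toreturn ++ buckets2.getD bucket []) []

-- ===== PORT B =====
def split_heuristic_helper_alt (toprocess : List ((Int × Int) × Int)) : List ((Int × Int) × Int) :=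
  PySem.List.sorted2 toprocess (fun p => PySem.Int.floordiv p.1.2 500) (fun p => p.1.1)

-- ===== PRECONDITION & SPEC =====
-- Pre_ excludes inputs containing a pair with negative y: there A raises KeyError (its buckets only
-- cover 0 .. maxy//500), so A returns on exactly the inputs Pre_ admits.
def Pre_split_heuristic_helper (toprocess : List ((Int × Int) × Int)) : Prop :=
  ∀ p ∈ toprocess, 0 ≤ p.1.2
instance (toprocess : List ((Int × Int) × Int)) : Decidable (Pre_split_heuristic_helper toprocess) := by unfold Pre_split_heuristic_helper; infer_instance
def pvWitness_split_heuristic_helper : (List ((Int × Int) × Int)) :=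
  [((3, 600), 1), ((1, 0), 2), ((7, 600), 0)]

def Spec_split_heuristic_helper (toprocess : List ((Int × Int) × Int)) (out : List ((Int × Int) × Int)) : Prop := out = split_heuristic_helper_alt toprocess
instance (toprocess : List ((Int × Int) × Int)) (out : List ((Int × Int) × Int)) : Decidable (Spec_split_heuristic_helper toprocess out) := by unfold Spec_split_heuristic_helper; infer_instance

-- ===== CLAIM (what is proved, stated in full; the proofs are below) =====
def Claim_equal_split_heuristic_helper : Prop := ∀ (toprocess : List ((Int × Int) × Int)), Dom_split_heuristic_helper toprocess → Pre_split_heuristic_helper toprocess → Spec_split_heuristic_helper toprocess (split_heuristic_helper toprocess)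

-- ===== LEMMAS AND PROOFS =====

-- insertBy walks past a prefix it does not go before
lemma insertBy_append_not {α : Type} (before : α → α → Bool) (x : α) (pre post : List α)
    (h : ∀ y ∈ pre, before x y = false) :
    PySem.List.insertBy before x (pre ++ post) = pre ++ PySem.List.insertBy before x post := by
  induction pre with
  | nil => simp
  | cons y ys ih =>
    have hy := h y (by simp)
    simp only [List.cons_append, PySem.List.insertBy, hy]
    simp only [Bool.false_eq_true, if_false, List.cons.injEq, true_and]
    exact ih (fun z hz => h z (by simp [hz]))

-- inserting into bucket ++ post, where x compares inside the bucket like b2 and goes before all of post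
lemma insertBy_bucket {α : Type} (lt b2 : α → α → Bool) (x : α) :
    ∀ (bucket post : List α), (∀ y ∈ bucket, lt x y = b2 x y) → (∀ y ∈ post, lt x y = true) →
    PySem.List.insertBy lt x (bucket ++ post) = PySem.List.insertBy b2 x bucket ++ post := by
  intro bucket
  induction bucket with
  | nil =>
    intro post _ hpost
    cases post with
    | nil => simp [PySem.List.insertBy]
    | cons z zs => simp [PySem.List.insertBy, hpost z (by simp)]
  | cons y ys ih =>
    intro post hb hpost
    have hy := hb y (by simp)
    simp only [List.cons_append, PySem.List.insertBy, hy]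
    by_cases h : b2 x y = true
    · simp [h]
    · simp only [h, Bool.false_eq_true, if_false, List.cons_append, List.cons.injEq, true_and]
      exact ih post (fun z hz => hb z (by simp [hz])) hpost

-- the heart: buckets (ascending, each stably sorted by k2) concatenated = one stable sort by (k1, k2)
lemma flatMap_buckets {α : Type} (k1 k2 : α → Int) :
    ∀ (xs : List α) (a b : Int), (∀ x ∈ xs, a ≤ k1 x ∧ k1 x < b) →
    (PySem.List.pyRange a b).flatMap
        (fun i => PySem.List.sorted (xs.filter (fun x => k1 x == i)) k2)
      = PySem.List.sorted2 xs k1 k2 := by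
  intro xs
  induction xs using List.reverseRecOn with
  | nil => intro a b _; simp [PySem.List.sorted, PySem.List.sorted2]
  | append_singleton xs x ih =>
    intro a b h
    have hx := h x (by simp)
    have hxs : ∀ y ∈ xs, a ≤ k1 y ∧ k1 y < b := fun y hy => h y (by simp [hy])
    have hsplit : PySem.List.pyRange a b
        = PySem.List.pyRange a (k1 x) ++ (k1 x :: PySem.List.pyRange (k1 x + 1) b) := by
      rw [PySem.List.pyRange_one_append a (k1 x) b hx.1 (by omega),
          PySem.List.pyRange_one_cons hx.2]
    -- the lexicographic comparator of sorted2
    set lt : α → α → Bool :=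
      fun p q => decide (k1 p < k1 q) || (!decide (k1 q < k1 p) && decide (k2 p < k2 q)) with hlt
    have hstep : PySem.List.sorted2 (xs ++ [x]) k1 k2
        = PySem.List.insertBy lt x (PySem.List.sorted2 xs k1 k2) := by
      simp [PySem.List.sorted2, List.foldl_append, hlt]
    rw [hstep, ← ih a b hxs, hsplit]
    simp only [List.flatMap_append, List.flatMap_cons]
    -- buckets of xs ++ [x]
    have hfilter : ∀ i : Int, (xs ++ [x]).filter (fun y => k1 y == i)
        = xs.filter (fun y => k1 y == i) ++ (if k1 x = i then [x] else []) := by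
      intro i; simp only [List.filter_append, List.filter_cons, List.filter_nil]
      by_cases hi : k1 x = i <;> simp [hi]
    have hPre : ∀ i ∈ PySem.List.pyRange a (k1 x),
        (xs ++ [x]).filter (fun y => k1 y == i) = xs.filter (fun y => k1 y == i) := by
      intro i hi
      rw [hfilter i, if_neg (by rcases PySem.List.mem_pyRange_one.1 hi with ⟨_, h2⟩; omega)]
      simp
    have hPost : ∀ i ∈ PySem.List.pyRange (k1 x + 1) b,
        (xs ++ [x]).filter (fun y => k1 y == i) = xs.filter (fun y => k1 y == i) := by
      intro i hi
      rw [hfilter i, if_neg (by rcases PySem.List.mem_pyRange_one.1 hi with ⟨h1, _⟩; omega)]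
      simp
    have epre : (PySem.List.pyRange a (k1 x)).flatMap
        (fun i => PySem.List.sorted ((xs ++ [x]).filter (fun y => k1 y == i)) k2)
        = (PySem.List.pyRange a (k1 x)).flatMap
        (fun i => PySem.List.sorted (xs.filter (fun y => k1 y == i)) k2) :=
      List.flatMap_congr (fun i hi => by rw [hPre i hi])
    have epost : (PySem.List.pyRange (k1 x + 1) b).flatMap
        (fun i => PySem.List.sorted ((xs ++ [x]).filter (fun y => k1 y == i)) k2)
        = (PySem.List.pyRange (k1 x + 1) b).flatMap
        (fun i => PySem.List.sorted (xs.filter (fun y => k1 y == i)) k2) :=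
      List.flatMap_congr (fun i hi => by rw [hPost i hi])
    rw [epre, epost]
    -- the k1 x bucket gains x at the end, and sorted is a fold: it becomes one insertBy
    have hbucket : PySem.List.sorted ((xs ++ [x]).filter (fun y => k1 y == k1 x)) k2
        = PySem.List.insertBy (fun p q => decide (k2 p < k2 q)) x
            (PySem.List.sorted (xs.filter (fun y => k1 y == k1 x)) k2) := by
      rw [hfilter (k1 x), if_pos rfl]
      simp [PySem.List.sorted, List.foldl_append]
    rw [hbucket]
    -- now commute the single insertBy into the concatenation
    rw [insertBy_append_not lt x _ _ (by
      intro y hy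
      simp only [List.mem_flatMap, PySem.List.mem_sorted, List.mem_filter, beq_iff_eq] at hy
      rcases hy with ⟨i, hi, _, hki⟩
      rcases PySem.List.mem_pyRange_one.1 hi with ⟨_, hilt⟩
      simp only [hlt]
      have h1 : ¬ (k1 x < k1 y) := by omega
      have h2 : k1 y < k1 x := by omega
      simp [h1, h2])]
    rw [insertBy_bucket lt (fun p q => decide (k2 p < k2 q)) x _ _
      (by
        intro y hy
        simp only [PySem.List.mem_sorted, List.mem_filter, beq_iff_eq] at hy
        simp [hlt, hy.2])
      (by
        intro y hy
        simp only [List.mem_flatMap, PySem.List.mem_sorted, List.mem_filter, beq_iff_eq] at hy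
        rcases hy with ⟨i, hi, _, hki⟩
        rcases PySem.List.mem_pyRange_one.1 hi with ⟨hile, _⟩
        simp only [hlt, Bool.or_eq_true, decide_eq_true_eq]
        left; omega)]

-- getD through the bucket-append loop: each bucket collects its filter, in order
lemma getD_foldl_modify_key_append {α : Type} (key : α → Int) :
    ∀ (l : List α) (d : PySem.Dict Int (List α)) (c : Int),
    ((l.foldl (fun d x => d.modify (key x) [] (· ++ [x])) d).getD c [])
      = d.getD c [] ++ l.filter (fun x => key x == c) := by
  intro l
  induction l with
  | nil => simp
  | cons x xs ih =>
    intro d c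
    simp only [List.foldl_cons, ih, PySem.Dict.getD_modify, List.filter_cons]
    by_cases h : c = key x
    · simp [h]
    · have : ¬ (key x = c) := fun hc => h hc.symm
      simp [h, this]

-- a fold of inserts at already-present keys leaves the key list unchanged
lemma keys_foldl_insert_self {α : Type} (f : PySem.Dict Int α → Int → α) :
    ∀ (ks : List Int) (d : PySem.Dict Int α), (∀ k ∈ ks, d.contains k = true) →
    (ks.foldl (fun d k => d.insert k (f d k)) d).keys = d.keys := by
  intro ks
  induction ks with
  | nil => simp
  | cons k ks ih =>
    intro d h
    simp only [List.foldl_cons]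
    rw [ih _ (by
      intro k' hk'
      rw [PySem.Dict.contains_insert]
      simp [h k' (by simp [hk'])]),
      PySem.Dict.keys_insert_of_contains _ _ (h k (by simp))]

-- same for the modify loop of the bucket-append phase
lemma keys_foldl_modify_self {α : Type} (key : α → Int) :
    ∀ (l : List α) (d : PySem.Dict Int (List α)), (∀ x ∈ l, d.contains (key x) = true) →
    (l.foldl (fun d x => d.modify (key x) [] (· ++ [x])) d).keys = d.keys := by
  intro l
  induction l with
  | nil => simp
  | cons x xs ih =>
    intro d h
    simp only [List.foldl_cons]
    rw [ih _ (by
      intro x' hx'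
      rw [PySem.Dict.contains_modify]
      simp [h x' (by simp [hx'])])]
    rw [PySem.Dict.keys_modify, PySem.Dict.keys_insert_of_contains _ _ (h x (by simp))]

lemma getD_foldl_insert_not_mem {α : Type} (g : α → α) (d0 : α) :
    ∀ (ks : List Int) (d : PySem.Dict Int α) (c : Int), c ∉ ks →
    (ks.foldl (fun d k => d.insert k (g (d.getD k d0))) d).getD c d0 = d.getD c d0 := by
  intro ks
  induction ks with
  | nil => simp
  | cons k ks ih =>
    intro d c hc
    simp only [List.foldl_cons]
    rw [ih _ _ (by simp at hc; exact hc.2), PySem.Dict.getD_insert,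
      if_neg (by simp at hc; exact hc.1)]

-- getD through the per-bucket sorting loop (distinct keys): the c-bucket gets g applied once
lemma getD_foldl_insert_apply {α : Type} (g : α → α) (d0 : α) :
    ∀ (ks : List Int) (d : PySem.Dict Int α) (c : Int), ks.Nodup → c ∈ ks →
    (ks.foldl (fun d k => d.insert k (g (d.getD k d0))) d).getD c d0 = g (d.getD c d0) := by
  intro ks
  induction ks with
  | nil => simp
  | cons k ks ih =>
    intro d c hnd hc
    simp only [List.foldl_cons]
    by_cases h : c = k
    · subst h
      rw [getD_foldl_insert_not_mem g d0 ks _ c (by simp at hnd; exact hnd.1)]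
      rw [PySem.Dict.getD_insert, if_pos rfl]
    · have hc' : c ∈ ks := by simp at hc; tauto
      rw [ih _ _ (by simp at hnd; exact hnd.2) hc', PySem.Dict.getD_insert, if_neg h]

-- the initial dict {0: [], 1: [], …}: its items list
lemma buckets0_items (n : Int) :
    ((PySem.List.pyRange 0 n).foldl
        (fun d i => d.insert i ([] : List ((Int × Int) × Int))) PySem.Dict.empty).items
      = (PySem.List.pyRange 0 n).map (fun i => (i, [])) := by
  have := PySem.Dict.items_foldl_insert_fresh (PySem.List.pyRange 0 n)
    (fun i => i) (fun _ => ([] : List ((Int × Int) × Int))) PySem.Dict.empty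
    (by intro a _; exact PySem.Dict.contains_empty a)
    (by simpa using PySem.List.nodup_pyRange_one 0 n)
  simpa using this

lemma buckets0_keys (n : Int) :
    ((PySem.List.pyRange 0 n).foldl
        (fun d i => d.insert i ([] : List ((Int × Int) × Int))) PySem.Dict.empty).keys
      = PySem.List.pyRange 0 n := by
  simp only [PySem.Dict.keys, buckets0_items]
  simp [Function.comp_def]

lemma buckets0_getD (n : Int) (c : Int) :
    ((PySem.List.pyRange 0 n).foldl
        (fun d i => d.insert i ([] : List ((Int × Int) × Int))) PySem.Dict.empty).getD c []
      = [] := by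
  by_cases hc : c ∈ PySem.List.pyRange 0 n
  · exact PySem.Dict.getD_of_mem_items _
      (by rw [buckets0_items]; exact List.mem_map.2 ⟨c, hc, rfl⟩)
      (by rw [buckets0_keys]; exact PySem.List.nodup_pyRange_one 0 n) []
  · refine PySem.Dict.getD_of_not_contains _ _ ?_
    rw [PySem.Dict.contains_eq_decide_mem_keys, buckets0_keys]
    simpa using hc

theorem split_heuristic_helper_eq (toprocess : List ((Int × Int) × Int))
    (hpre : Pre_split_heuristic_helper toprocess) :
    split_heuristic_helper toprocess = split_heuristic_helper_alt toprocess := by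
  unfold split_heuristic_helper split_heuristic_helper_alt
  simp only []
  set maxy : Int :=
    toprocess.foldl (fun maxy pair => if pair.1.2 > maxy then pair.1.2 else maxy) 0 with hmaxy
  set n : Int := PySem.Int.floordiv maxy 500 + 1 with hn
  set K : ((Int × Int) × Int) → Int := fun p => PySem.Int.floordiv p.1.2 500 with hK
  -- maxy is a running max
  have hmax' : maxy = toprocess.foldl (fun acc y => max acc y.1.2) 0 := by
    rw [hmaxy]
    exact PySem.List.foldl_congr_mem _ _ _ _ (by
      intro acc x _
      by_cases hgt : x.1.2 > acc
      · simp [hgt, max_eq_right (le_of_lt hgt)]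
      · simp [hgt, max_eq_left (not_lt.1 hgt)])
  have hmaxb := PySem.List.le_foldl_max_int toprocess (fun p => p.1.2) 0
  -- every key K p lands in [0, n)
  have hkey : ∀ p ∈ toprocess, 0 ≤ K p ∧ K p < n := by
    intro p hp
    have h0 : (0:Int) < 500 := by norm_num
    have hy : 0 ≤ p.1.2 := hpre p hp
    have hle : p.1.2 ≤ maxy := by rw [hmax']; exact hmaxb.2 p hp
    have h0m : 0 ≤ maxy := by rw [hmax']; exact hmaxb.1
    constructor
    · rw [hK]; simp only []
      rw [PySem.Int.floordiv_eq_ediv_of_pos h0]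
      exact Int.ediv_nonneg hy (by norm_num)
    · rw [hK, hn]; simp only []
      rw [PySem.Int.floordiv_eq_ediv_of_pos h0, PySem.Int.floordiv_eq_ediv_of_pos h0]
      have := Int.ediv_le_ediv h0 hle
      omega
  set buckets0 : PySem.Dict Int (List ((Int × Int) × Int)) :=
    (PySem.List.pyRange 0 n).foldl (fun d i => d.insert i []) PySem.Dict.empty with hb0
  set buckets1 := toprocess.foldl
    (fun d pair => d.modify (PySem.Int.floordiv pair.1.2 500) [] (· ++ [pair])) buckets0 with hb1
  have hcont0 : ∀ c : Int, 0 ≤ c → c < n → buckets0.contains c = true := by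
    intro c h1 h2
    rw [hb0, PySem.Dict.contains_eq_decide_mem_keys, buckets0_keys]
    simp [PySem.List.mem_pyRange_one, h1, h2]
  have hkeys1 : buckets1.keys = PySem.List.pyRange 0 n := by
    rw [hb1, keys_foldl_modify_self (fun p => PySem.Int.floordiv p.1.2 500) toprocess buckets0
      (fun p hp => hcont0 _ (hkey p hp).1 (hkey p hp).2)]
    rw [hb0, buckets0_keys]
  have hgetD1 : ∀ c : Int, buckets1.getD c [] = toprocess.filter (fun p => K p == c) := by
    intro c
    rw [hb1, getD_foldl_modify_key_append (fun p => PySem.Int.floordiv p.1.2 500) toprocess buckets0 c,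
      hb0, buckets0_getD]
    simp [hK]
  set buckets2 := buckets1.keys.foldl
    (fun d bucket => d.insert bucket (PySem.List.sorted (d.getD bucket []) (fun x => x.1.1)))
    buckets1 with hb2
  have hkeys2 : buckets2.keys = PySem.List.pyRange 0 n := by
    rw [hb2, keys_foldl_insert_self _ buckets1.keys buckets1 (by
      intro k hk
      rw [PySem.Dict.contains_eq_decide_mem_keys]
      simp [hk]), hkeys1]
  have hgetD2 : ∀ c ∈ PySem.List.pyRange 0 n,
      buckets2.getD c []
        = PySem.List.sorted (toprocess.filter (fun p => K p == c)) (fun x => x.1.1) := by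
    intro c hc
    rw [hb2, getD_foldl_insert_apply (fun v => PySem.List.sorted v (fun x => x.1.1)) [] buckets1.keys
      buckets1 c (by rw [hkeys1]; exact PySem.List.nodup_pyRange_one 0 n) (by rw [hkeys1]; exact hc),
      hgetD1]
  rw [hkeys2, PySem.List.foldl_append_eq_flatMap (fun k => buckets2.getD k []), List.nil_append]
  have efin : (PySem.List.pyRange 0 n).flatMap (fun k => buckets2.getD k [])
      = (PySem.List.pyRange 0 n).flatMap
        (fun c => PySem.List.sorted (toprocess.filter (fun p => K p == c)) (fun x => x.1.1)) :=
    List.flatMap_congr (fun i hi => by rw [hgetD2 i hi])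
  rw [efin]
  exact flatMap_buckets K (fun p => p.1.1) toprocess 0 n hkey

-- ===== VERDICT (by name: the statement is the Claim_ definition above) =====
theorem split_heuristic_helper_spec : Claim_equal_split_heuristic_helper := by
  intro toprocess _ hpre
  unfold Spec_split_heuristic_helper
  exact split_heuristic_helper_eq toprocess hpre
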